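-- pv_equiv track=rewrite | github.com/syi4/AOC | 2024/two/two_main.py | get_safe_two
-- ===== SOURCE A (Python) =====
-- def is_safe(level):
--     is_asc = all(level[i] <= level[i+1] and 1 <= (level[i+1] - level[i]) <= 3 for i in range(len(level) - 1))
--     is_desc = all(level[i] >= level[i + 1] and 1 <= (level[i] - level[i + 1]) <= 3 for i in range(len(level) - 1))
--
--     return is_asc or is_desc
--
-- def get_safe_two(input):
--     safe = 0
--
--     for level in input:
--         if is_safe(level):
--             safe += 1
--         else:
--             for i in range(len(level)):
--                 new_level = level[:i] + level[i + 1:]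
--
--                 if is_safe(new_level):
--                     safe += 1
--                     break
--
--     return safe
-- ===== SOURCE B (Python) =====
-- def _asc_ok(a, b):
--     return 1 <= b - a <= 3
--
--
-- def _first_bad(level, ok):
--     # index of the first adjacent pair violating ok, or None
--     for j in range(len(level) - 1):
--         if not ok(level[j], level[j + 1]):
--             return j
--     return None
--
--
-- def _fixable(level, ok):
--     # monotone (w.r.t. ok) after removing at most one element?
--     # If the first violating pair is (j, j+1), only removing j or j+1 can help:
--     # any other removal leaves that violating pair adjacent.
--     j = _first_bad(level, ok)
--     if j is None:
--         return True
--     return (_first_bad(level[:j] + level[j + 1:], ok) is None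
--             or _first_bad(level[:j + 1] + level[j + 2:], ok) is None)
--
--
-- def get_safe_two(input):
--     safe = 0
--     for level in input:
--         if _fixable(level, _asc_ok) or _fixable(level, lambda a, b: _asc_ok(b, a)):
--             safe += 1
--     return safe
-- ===== Notes on version B (the rewrite author's own statement) =====
-- stated objective: faster
-- what changed: Instead of trying to delete every index and re-checking the whole report (O(n^2) per report), B locates the first adjacent pair violating the direction and only tests deleting its two endpoints, per direction, since any other deletion leaves the violating pair adjacent.
import Mathlib
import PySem

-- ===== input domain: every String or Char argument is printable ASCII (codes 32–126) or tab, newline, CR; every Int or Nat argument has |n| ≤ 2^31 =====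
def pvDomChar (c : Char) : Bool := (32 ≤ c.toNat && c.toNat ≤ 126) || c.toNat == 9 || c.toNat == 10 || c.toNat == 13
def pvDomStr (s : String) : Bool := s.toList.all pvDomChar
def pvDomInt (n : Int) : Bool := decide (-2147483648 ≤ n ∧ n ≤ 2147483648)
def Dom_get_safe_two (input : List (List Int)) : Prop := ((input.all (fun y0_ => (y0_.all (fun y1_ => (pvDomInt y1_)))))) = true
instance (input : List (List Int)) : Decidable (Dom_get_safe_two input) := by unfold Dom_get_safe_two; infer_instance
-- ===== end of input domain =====

-- B replaces A's try-every-deletion O(n^2)-per-report check by locating the first violating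
-- adjacent pair and testing only the deletion of its two endpoints (per direction): faster.


-- ===== PORT A =====
-- level[i] for i coming from range(len(level)-1) (always in range, so the default never fires)
def pvGetA (l : List Int) (i : Int) : Int := PySem.List.pyGetD l i 0

def pvIsSafe (level : List Int) : Bool :=
  let n : Int := PySem.List.len level
  let isAsc := (PySem.List.pyRange 0 (n - 1) 1).all (fun i =>
    decide (pvGetA level i ≤ pvGetA level (i + 1)) &&
    (decide (1 ≤ pvGetA level (i + 1) - pvGetA level i) &&
     decide (pvGetA level (i + 1) - pvGetA level i ≤ 3)))
  let isDesc := (PySem.List.pyRange 0 (n - 1) 1).all (fun i =>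
    decide (pvGetA level (i + 1) ≤ pvGetA level i) &&
    (decide (1 ≤ pvGetA level i - pvGetA level (i + 1)) &&
     decide (pvGetA level i - pvGetA level (i + 1) ≤ 3)))
  isAsc || isDesc

-- the inner `for i in range(len(level)): … break` loop: 1 was added iff some deletion is safe
def pvAnyRemoved (level : List Int) : Bool :=
  (PySem.List.pyRange 0 (PySem.List.len level) 1).any (fun i =>
    pvIsSafe (PySem.List.slice level none (some i) ++
              PySem.List.slice level (some (i + 1)) none))

def get_safe_two (input : List (List Int)) : Int :=
  input.foldl (fun safe level =>
    if pvIsSafe level then safe + 1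
    else if pvAnyRemoved level then safe + 1
    else safe) 0

-- ===== PORT B =====
def pvOkAsc (a b : Int) : Bool := decide (1 ≤ b - a) && decide (b - a ≤ 3)

def pvOkDesc (a b : Int) : Bool := pvOkAsc b a

def pvFirstBad (ok : Int → Int → Bool) : List Int → Option Nat
  | a :: b :: t => if ok a b then (pvFirstBad ok (b :: t)).map (· + 1) else some 0
  | _ => none

def pvFixable (ok : Int → Int → Bool) (level : List Int) : Bool :=
  match pvFirstBad ok level with
  | none => true
  | some j =>
    (pvFirstBad ok (level.take j ++ level.drop (j + 1))).isNone ||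
    (pvFirstBad ok (level.take (j + 1) ++ level.drop (j + 2))).isNone

def get_safe_two_alt (input : List (List Int)) : Int :=
  input.foldl (fun safe level =>
    if pvFixable pvOkAsc level || pvFixable pvOkDesc level then safe + 1 else safe) 0

-- ===== PRECONDITION & SPEC =====
def Spec_get_safe_two (input : List (List Int)) (out : Int) : Prop := out = get_safe_two_alt input
instance (input : List (List Int)) (out : Int) : Decidable (Spec_get_safe_two input out) := by unfold Spec_get_safe_two; infer_instance

-- ===== CLAIM (what is proved, stated in full; the proofs are below) =====
def Claim_equal_get_safe_two : Prop := ∀ (input : List (List Int)), Dom_get_safe_two input → Spec_get_safe_two input (get_safe_two input)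

-- ===== LEMMAS AND PROOFS =====

-- "every adjacent pair of l satisfies ok"
def pvChain (ok : Int → Int → Bool) (l : List Int) : Prop :=
  ∀ k : Nat, k + 1 < l.length → ok (l.getD k 0) (l.getD (k + 1) 0) = true

lemma pvChain_short (ok : Int → Int → Bool) (l : List Int) (h : l.length ≤ 1) :
    pvChain ok l := by
  intro k hk; omega

lemma pvChain_cons₂ (ok : Int → Int → Bool) (a b : Int) (t : List Int) :
    pvChain ok (a :: b :: t) ↔ ok a b = true ∧ pvChain ok (b :: t) := by
  constructor
  · intro h
    refine ⟨h 0 (by simp), fun k hk => ?_⟩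
    have := h (k + 1) (by simp only [List.length_cons] at hk ⊢; omega)
    simpa using this
  · rintro ⟨h0, h⟩ k hk
    cases k with
    | zero => simpa using h0
    | succ k => simpa using h k (by simp only [List.length_cons] at hk ⊢; omega)

lemma pvFirstBad_none_iff (ok : Int → Int → Bool) (l : List Int) :
    pvFirstBad ok l = none ↔ pvChain ok l := by
  induction l with
  | nil => simp [pvFirstBad, pvChain_short ok [] (by simp)]
  | cons a t ih =>
    cases t with
    | nil => simp [pvFirstBad, pvChain_short ok [a] (by simp)]
    | cons b t' =>
      rw [pvChain_cons₂]
      simp only [pvFirstBad]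
      split_ifs with hab
      · simp [hab, Option.map_eq_none_iff, ih]
      · simp [hab]

lemma pvFirstBad_some (ok : Int → Int → Bool) (l : List Int) (j : Nat)
    (h : pvFirstBad ok l = some j) :
    j + 1 < l.length ∧ ok (l.getD j 0) (l.getD (j + 1) 0) = false := by
  induction l generalizing j with
  | nil => simp [pvFirstBad] at h
  | cons a t ih =>
    cases t with
    | nil => simp [pvFirstBad] at h
    | cons b t' =>
      simp only [pvFirstBad] at h
      split_ifs at h with hab
      · rcases Option.map_eq_some_iff.mp h with ⟨j', hj', rfl⟩
        have := ih j' hj'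
        constructor
        · simp only [List.length_cons] at this ⊢; omega
        · simpa using this.2
      · rcases Option.some_inj.mp h with rfl
        refine ⟨by simp only [List.length_cons]; omega, by simpa using (Bool.not_eq_true _).mp hab⟩

-- deleting any index other than j or j+1 keeps the violating pair (j, j+1) adjacent
lemma pvSurvive (ok : Int → Int → Bool) (l : List Int) (j i : Nat)
    (hj : pvFirstBad ok l = some j) (hi : i < l.length)
    (h1 : i ≠ j) (h2 : i ≠ j + 1) : ¬ pvChain ok (l.eraseIdx i) := by
  obtain ⟨hjl, hbad⟩ := pvFirstBad_some ok l j hj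
  intro hch
  have hlen : (l.eraseIdx i).length = l.length - 1 := by
    rw [List.length_eraseIdx]; simp [hi]
  by_cases hij : i < j
  · have hb : (j - 1) + 1 < (l.eraseIdx i).length := by omega
    have := hch (j - 1) hb
    rw [List.getD_eq_getElem _ _ (by omega), List.getD_eq_getElem _ _ (by omega)] at this
    rw [List.getElem_eraseIdx_of_ge _ (by omega), List.getElem_eraseIdx_of_ge _ (by omega)] at this
    have hj1 : j - 1 + 1 = j := by omega
    rw [List.getD_eq_getElem _ _ (by omega), List.getD_eq_getElem _ _ (by omega)] at hbad
    simp only [hj1] at this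
    rw [this] at hbad
    exact absurd hbad (by simp)
  · have hij2 : j + 1 < i := by omega
    have hb : j + 1 < (l.eraseIdx i).length := by omega
    have := hch j hb
    rw [List.getD_eq_getElem _ _ (by omega), List.getD_eq_getElem _ _ (by omega)] at this
    rw [List.getElem_eraseIdx_of_lt _ (by omega), List.getElem_eraseIdx_of_lt _ (by omega)] at this
    rw [List.getD_eq_getElem _ _ (by omega), List.getD_eq_getElem _ _ (by omega)] at hbad
    rw [this] at hbad
    exact absurd hbad (by simp)

lemma pvAllPairs_iff (l : List Int) (q : Int → Int → Bool) :
    ((PySem.List.pyRange 0 (PySem.List.len l - 1) 1).all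
      (fun i => q (pvGetA l i) (pvGetA l (i + 1)))) = true ↔ pvChain q l := by
  rw [List.all_eq_true]
  constructor
  · intro h k hk
    have hm : (k : Int) ∈ PySem.List.pyRange 0 (PySem.List.len l - 1) 1 := by
      rw [PySem.List.mem_pyRange_one]
      constructor
      · exact Int.natCast_nonneg k
      · rw [PySem.List.len_eq]; omega
    have := h _ hm
    simp only [pvGetA] at this
    rw [show ((k : Int) + 1) = ((k + 1 : Nat) : Int) by push_cast; ring] at this
    rw [PySem.List.pyGetD_natCast, PySem.List.pyGetD_natCast] at this
    simpa using this
  · intro h i hi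
    rw [PySem.List.mem_pyRange_one] at hi
    rw [PySem.List.len_eq] at hi
    have hk : i = ((i.toNat : Nat) : Int) := by omega
    rw [hk]
    simp only [pvGetA]
    rw [show (((i.toNat : Nat) : Int) + 1) = ((i.toNat + 1 : Nat) : Int) by push_cast; ring]
    rw [PySem.List.pyGetD_natCast, PySem.List.pyGetD_natCast]
    exact h i.toNat (by omega)

lemma pvIsSafe_iff (l : List Int) :
    pvIsSafe l = true ↔ pvChain pvOkAsc l ∨ pvChain pvOkDesc l := by
  have hasc : (fun a b : Int => decide (a ≤ b) && (decide (1 ≤ b - a) && decide (b - a ≤ 3)))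
      = pvOkAsc := by
    funext a b
    rw [Bool.eq_iff_iff]
    simp only [pvOkAsc, Bool.and_eq_true, decide_eq_true_eq]
    omega
  have hdesc : (fun a b : Int => decide (b ≤ a) && (decide (1 ≤ a - b) && decide (a - b ≤ 3)))
      = pvOkDesc := by
    funext a b
    rw [Bool.eq_iff_iff]
    simp only [pvOkDesc, pvOkAsc, Bool.and_eq_true, decide_eq_true_eq]
    omega
  show (_ || _) = true ↔ _
  rw [Bool.or_eq_true]
  constructor
  · rintro (h | h)
    · left
      rw [← pvAllPairs_iff l pvOkAsc, ← hasc]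
      exact h
    · right
      rw [← pvAllPairs_iff l pvOkDesc, ← hdesc]
      exact h
  · rintro (h | h)
    · left
      rw [← pvAllPairs_iff l pvOkAsc, ← hasc] at h
      exact h
    · right
      rw [← pvAllPairs_iff l pvOkDesc, ← hdesc] at h
      exact h

lemma pvAnyRemoved_iff (l : List Int) :
    pvAnyRemoved l = true ↔ ∃ k : Nat, k < l.length ∧ pvIsSafe (l.eraseIdx k) = true := by
  unfold pvAnyRemoved
  rw [List.any_eq_true]
  constructor
  · rintro ⟨i, hi, hsafe⟩
    rw [PySem.List.mem_pyRange_one, PySem.List.len_eq] at hi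
    refine ⟨i.toNat, by omega, ?_⟩
    rw [PySem.List.slice_to _ hi.1, PySem.List.slice_from _ (by omega : (0:Int) ≤ i + 1)] at hsafe
    rw [show (i + 1).toNat = i.toNat + 1 by omega] at hsafe
    rwa [← List.eraseIdx_eq_take_drop_succ] at hsafe
  · rintro ⟨k, hk, hsafe⟩
    refine ⟨(k : Int), ?_, ?_⟩
    · rw [PySem.List.mem_pyRange_one, PySem.List.len_eq]
      constructor
      · exact Int.natCast_nonneg k
      · omega
    · rw [PySem.List.slice_to _ (Int.natCast_nonneg k), PySem.List.slice_from _ (by positivity : (0:Int) ≤ (k : Int) + 1)]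
      rw [show ((k : Int) + 1).toNat = k + 1 by omega, show ((k : Int)).toNat = k by omega]
      rwa [← List.eraseIdx_eq_take_drop_succ]

lemma pvFixable_iff (ok : Int → Int → Bool) (l : List Int) :
    pvFixable ok l = true ↔
      pvChain ok l ∨ ∃ j, pvFirstBad ok l = some j ∧
        (pvChain ok (l.eraseIdx j) ∨ pvChain ok (l.eraseIdx (j + 1))) := by
  unfold pvFixable
  cases h : pvFirstBad ok l with
  | none =>
    simp only [true_iff]
    exact Or.inl ((pvFirstBad_none_iff ok l).mp h)
  | some j =>
    simp only []
    have hnc : ¬ pvChain ok l := fun hc => by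
      rw [← pvFirstBad_none_iff ok l] at hc; rw [h] at hc; simp at hc
    rw [← List.eraseIdx_eq_take_drop_succ, ← List.eraseIdx_eq_take_drop_succ]
    rw [Bool.or_eq_true, Option.isNone_iff_eq_none, Option.isNone_iff_eq_none,
      pvFirstBad_none_iff, pvFirstBad_none_iff]
    constructor
    · intro hor
      exact Or.inr ⟨j, rfl, hor⟩
    · rintro (hc | ⟨j', hj', hor⟩)
      · exact absurd hc hnc
      · rcases Option.some_inj.mp hj' with rfl
        exact hor

lemma pvRow_iff (l : List Int) :
    (pvFixable pvOkAsc l || pvFixable pvOkDesc l) = (pvIsSafe l || pvAnyRemoved l) := by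
  rw [Bool.eq_iff_iff, Bool.or_eq_true, Bool.or_eq_true]
  rw [pvFixable_iff, pvFixable_iff, pvIsSafe_iff, pvAnyRemoved_iff]
  constructor
  · rintro (h | h)
    · rcases h with hc | ⟨j, hj, hor⟩
      · exact Or.inl (Or.inl hc)
      · obtain ⟨hjl, -⟩ := pvFirstBad_some _ _ _ hj
        rcases hor with hc | hc
        · exact Or.inr ⟨j, by omega, (pvIsSafe_iff _).mpr (Or.inl hc)⟩
        · exact Or.inr ⟨j + 1, by omega, (pvIsSafe_iff _).mpr (Or.inl hc)⟩
    · rcases h with hc | ⟨j, hj, hor⟩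
      · exact Or.inl (Or.inr hc)
      · obtain ⟨hjl, -⟩ := pvFirstBad_some _ _ _ hj
        rcases hor with hc | hc
        · exact Or.inr ⟨j, by omega, (pvIsSafe_iff _).mpr (Or.inr hc)⟩
        · exact Or.inr ⟨j + 1, by omega, (pvIsSafe_iff _).mpr (Or.inr hc)⟩
  · rintro (h | ⟨k, hk, hsafe⟩)
    · rcases h with hc | hc
      · exact Or.inl (Or.inl hc)
      · exact Or.inr (Or.inl hc)
    · rcases (pvIsSafe_iff _).mp hsafe with hc | hc
      · left
        cases hfb : pvFirstBad pvOkAsc l with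
        | none => exact Or.inl ((pvFirstBad_none_iff _ _).mp hfb)
        | some j =>
          by_cases h1 : k = j
          · exact Or.inr ⟨j, rfl, Or.inl (h1 ▸ hc)⟩
          by_cases h2 : k = j + 1
          · exact Or.inr ⟨j, rfl, Or.inr (h2 ▸ hc)⟩
          exact absurd hc (pvSurvive _ _ _ _ hfb hk h1 h2)
      · right
        cases hfb : pvFirstBad pvOkDesc l with
        | none => exact Or.inl ((pvFirstBad_none_iff _ _).mp hfb)
        | some j =>
          by_cases h1 : k = j
          · exact Or.inr ⟨j, rfl, Or.inl (h1 ▸ hc)⟩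
          by_cases h2 : k = j + 1
          · exact Or.inr ⟨j, rfl, Or.inr (h2 ▸ hc)⟩
          exact absurd hc (pvSurvive _ _ _ _ hfb hk h1 h2)

lemma pvFold_eq (input : List (List Int)) (s : Int) :
    input.foldl (fun safe level =>
      if pvIsSafe level then safe + 1
      else if pvAnyRemoved level then safe + 1
      else safe) s =
    input.foldl (fun safe level =>
      if pvFixable pvOkAsc level || pvFixable pvOkDesc level then safe + 1 else safe) s := by
  induction input generalizing s with
  | nil => rfl
  | cons l t ih =>
    simp only [List.foldl_cons]
    rw [pvRow_iff l]
    cases hs : pvIsSafe l <;> cases ha : pvAnyRemoved l <;> simp [ih]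

-- ===== VERDICT (by name: the statement is the Claim_ definition above) =====
theorem get_safe_two_spec : Claim_equal_get_safe_two := by
  intro input _
  unfold Spec_get_safe_two get_safe_two get_safe_two_alt
  exact pvFold_eq input 0
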